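-- pv_equiv track=rewrite | github.com/Panda-F/VRFusion | vrBackend/scene_understand/test.py | max_essence_posts
-- ===== SOURCE A (Python) =====
-- def max_essence_posts(n, m, k, intervals):
--     posts = ["普通"] * n  # 初始帖子列表为全"普通"状态
--
--     # 将区间内的帖子状态设置为"精华"
--     for interval in intervals:
--         li, ri = interval
--         for i in range(li - 1, ri):
--             posts[i] = "精华"
--
--     # 遍历数组，计算每个长度为k的连续子数组中"精华"帖子的数量，并记录最大值
--     max_essence = 0
--     for i in range(n - k + 1):
--         essence_count = 0
--         for j in range(i, i + k):
--             if posts[j] == "精华":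
--                 essence_count += 1
--         max_essence = max(max_essence, essence_count)
--
--     return max_essence
-- ===== SOURCE B (Python) =====
-- def max_essence_posts(n, m, k, intervals):
--     # bool marking pass, then prefix sums: each window count is one subtraction
--     marked = [False] * n
--     for li, ri in intervals:
--         for i in range(li - 1, ri):
--             marked[i] = True
--     if k <= 0 or k > n:
--         return 0
--     pref = [0]
--     for v in marked:
--         pref.append(pref[-1] + (1 if v else 0))
--     return max(pref[j + k] - pref[j] for j in range(n - k + 1))
-- ===== Notes on version B (the rewrite author's own statement) =====
-- stated objective: alternative
-- what changed: B marks into a bool array and replaces A's fresh O(k) rescan of every length-k window by prefix sums of the marked array, so each window count becomes one subtraction pref[j+k]-pref[j].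
import Mathlib
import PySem

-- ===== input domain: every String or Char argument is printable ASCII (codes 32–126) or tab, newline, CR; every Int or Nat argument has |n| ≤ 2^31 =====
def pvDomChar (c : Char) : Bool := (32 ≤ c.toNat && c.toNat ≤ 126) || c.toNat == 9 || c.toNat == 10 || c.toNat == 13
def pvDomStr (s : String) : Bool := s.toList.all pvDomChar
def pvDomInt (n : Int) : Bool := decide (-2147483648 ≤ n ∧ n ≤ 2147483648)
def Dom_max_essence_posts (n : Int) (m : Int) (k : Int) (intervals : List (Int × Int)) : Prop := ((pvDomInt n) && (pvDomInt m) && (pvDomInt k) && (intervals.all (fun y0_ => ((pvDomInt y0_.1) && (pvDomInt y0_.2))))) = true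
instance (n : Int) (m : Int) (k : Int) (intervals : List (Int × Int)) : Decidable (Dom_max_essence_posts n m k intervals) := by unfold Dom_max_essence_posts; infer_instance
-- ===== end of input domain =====

-- B keeps A's marking pass (on a bool array) but replaces the per-window rescan by
-- prefix sums of the marked array (objective: alternative).

-- ===== PORT A =====
-- pySetD / pyGetD are exact for in-range (incl. negative-wrap) indices; out-of-range
-- indices raise IndexError in Python and are excluded by Pre_.
def max_essence_posts (n : Int) (m : Int) (k : Int) (intervals : List (Int × Int)) : Int :=
  let posts0 : List String := List.replicate n.toNat "普通"
  let posts := intervals.foldl (fun ps iv =>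
      (PySem.List.pyRange (iv.1 - 1) iv.2 1).foldl
        (fun a i => PySem.List.pySetD a i "精华") ps) posts0
  (PySem.List.pyRange 0 (n - k + 1) 1).foldl (fun me i =>
      max me ((PySem.List.pyRange i (i + k) 1).foldl
        (fun c j => if PySem.List.pyGetD posts j "" = "精华" then c + 1 else c) (0 : Int))) 0

-- ===== PORT B =====
-- Python's max(...) over the (nonempty, by the guard) window list is PySem.List.max?.
def max_essence_posts_alt (n : Int) (m : Int) (k : Int) (intervals : List (Int × Int)) : Int :=
  let marked := intervals.foldl (fun bs iv =>
      (PySem.List.pyRange (iv.1 - 1) iv.2 1).foldl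
        (fun a i => PySem.List.pySetD a i true) bs) (List.replicate n.toNat false)
  if k ≤ 0 ∨ n < k then 0
  else
    let pref := marked.foldl
      (fun pref v => pref ++ [PySem.List.pyGetD pref (-1) 0 + (if v then 1 else 0)])
      ([0] : List Int)
    ((PySem.List.max?
        ((PySem.List.pyRange 0 (n - k + 1) 1).map
          (fun j => PySem.List.pyGetD pref (j + k) 0 - PySem.List.pyGetD pref j 0))
        (fun x => x)).getD 0)

-- ===== PRECONDITION & SPEC =====
-- Pre_ holds exactly when every interval's index range stays inside the posts list
-- (Python-wise: negative indices down to -len wrap); outside it both Pythons raise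
-- IndexError in the identical marking loop, so Pre_ excludes no input A returns on.
def Pre_max_essence_posts (n : Int) (m : Int) (k : Int) (intervals : List (Int × Int)) : Prop :=
  ∀ p ∈ intervals, p.2 < p.1 ∨ (1 - max n 0 ≤ p.1 ∧ p.2 ≤ max n 0)
instance (n : Int) (m : Int) (k : Int) (intervals : List (Int × Int)) : Decidable (Pre_max_essence_posts n m k intervals) := by unfold Pre_max_essence_posts; infer_instance
def pvWitness_max_essence_posts : Int × Int × Int × (List (Int × Int)) := (5, 1, 2, [(1, 3), (4, 4)])

def Spec_max_essence_posts (n : Int) (m : Int) (k : Int) (intervals : List (Int × Int)) (out : Int) : Prop := out = max_essence_posts_alt n m k intervals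
instance (n : Int) (m : Int) (k : Int) (intervals : List (Int × Int)) (out : Int) : Decidable (Spec_max_essence_posts n m k intervals out) := by unfold Spec_max_essence_posts; infer_instance

-- ===== CLAIM (what is proved, stated in full; the proofs are below) =====
def Claim_equal_max_essence_posts : Prop := ∀ (n : Int) (m : Int) (k : Int) (intervals : List (Int × Int)), Dom_max_essence_posts n m k intervals → Pre_max_essence_posts n m k intervals → Spec_max_essence_posts n m k intervals (max_essence_posts n m k intervals)

-- ===== LEMMAS AND PROOFS =====

-- prefix count of marked cells below t
def pvS (bs : List Bool) (t : Nat) : Int :=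
  ((PySem.List.pyRange 0 (t : Int) 1).countP (fun x => bs.getD x.toNat false) : Int)

-- one pySetD step preserves the string/bool correspondence (same length ⇒ same
-- resolved index, including Python's negative wrap and the out-of-range no-op)
lemma pvSetStep (ps : List String) (bs : List Bool) (i : Int) (j : Nat)
    (hlen : ps.length = bs.length)
    (hj : ps.getD j "" = "精华" ↔ bs.getD j false = true) :
    (PySem.List.pySetD ps i "精华").getD j "" = "精华" ↔
      (PySem.List.pySetD bs i true).getD j false = true := by
  simp only [PySem.List.pySetD, PySem.List.pySet?, hlen]
  cases ht : PySem.List.pyIdx? bs.length i with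
  | none => simpa using hj
  | some t =>
    simp only [Option.map_some, Option.getD_some]
    rw [List.getD_eq_getElem?_getD, List.getD_eq_getElem?_getD, List.getElem?_set,
      List.getElem?_set, hlen]
    by_cases hjt : t = j
    · subst hjt
      by_cases hb : t < bs.length <;> simp [hb]
    · simp only [if_neg hjt]
      rw [← List.getD_eq_getElem?_getD, ← List.getD_eq_getElem?_getD]
      exact hj
lemma pvRelRange : ∀ (L : List Int) (ps : List String) (bs : List Bool),
    ps.length = bs.length →
    (∀ j : Nat, ps.getD j "" = "精华" ↔ bs.getD j false = true) →
    ((L.foldl (fun a i => PySem.List.pySetD a i "精华") ps).length = ps.length ∧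
     (L.foldl (fun a i => PySem.List.pySetD a i true) bs).length = bs.length ∧
     ∀ j : Nat, (L.foldl (fun a i => PySem.List.pySetD a i "精华") ps).getD j "" = "精华" ↔
       (L.foldl (fun a i => PySem.List.pySetD a i true) bs).getD j false = true) := by
  intro L
  induction L with
  | nil => exact fun ps bs h hj => ⟨rfl, rfl, hj⟩
  | cons x L ih =>
    intro ps bs hlen hj
    simp only [List.foldl_cons]
    obtain ⟨h1, h2, h3⟩ := ih (PySem.List.pySetD ps x "精华") (PySem.List.pySetD bs x true)
      (by rw [PySem.List.length_pySetD, PySem.List.length_pySetD]; exact hlen)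
      (fun j => pvSetStep ps bs x j hlen (hj j))
    exact ⟨by rw [h1, PySem.List.length_pySetD], by rw [h2, PySem.List.length_pySetD], h3⟩

lemma pvRelMark : ∀ (ivs : List (Int × Int)) (ps : List String) (bs : List Bool),
    ps.length = bs.length →
    (∀ j : Nat, ps.getD j "" = "精华" ↔ bs.getD j false = true) →
    ((ivs.foldl (fun ps iv => (PySem.List.pyRange (iv.1 - 1) iv.2 1).foldl
        (fun a i => PySem.List.pySetD a i "精华") ps) ps).length = ps.length ∧
     (ivs.foldl (fun bs iv => (PySem.List.pyRange (iv.1 - 1) iv.2 1).foldl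
        (fun a i => PySem.List.pySetD a i true) bs) bs).length = bs.length ∧
     ∀ j : Nat, (ivs.foldl (fun ps iv => (PySem.List.pyRange (iv.1 - 1) iv.2 1).foldl
        (fun a i => PySem.List.pySetD a i "精华") ps) ps).getD j "" = "精华" ↔
       (ivs.foldl (fun bs iv => (PySem.List.pyRange (iv.1 - 1) iv.2 1).foldl
        (fun a i => PySem.List.pySetD a i true) bs) bs).getD j false = true) := by
  intro ivs
  induction ivs with
  | nil => exact fun ps bs h hj => ⟨rfl, rfl, hj⟩
  | cons iv rest ih =>
    intro ps bs hlen hj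
    simp only [List.foldl_cons]
    obtain ⟨ha1, ha2, ha3⟩ := pvRelRange (PySem.List.pyRange (iv.1 - 1) iv.2 1) ps bs hlen hj
    obtain ⟨h1, h2, h3⟩ := ih _ _ (by rw [ha1, ha2]; exact hlen) ha3
    exact ⟨by rw [h1, ha1], by rw [h2, ha2], h3⟩

lemma pvGetPref (bs : List Bool) (M t : Nat) (h : t < M) :
    PySem.List.pyGetD ((List.range M).map (fun t => pvS bs t)) (t : Int) 0 = pvS bs t := by
  rw [PySem.List.pyGetD_natCast, List.getD_eq_getElem?_getD, List.getElem?_map,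
    List.getElem?_range h]
  rfl

lemma pvPrefBuild : ∀ (bs : List Bool),
    bs.foldl (fun pref v => pref ++ [PySem.List.pyGetD pref (-1) 0 + (if v then 1 else 0)])
      ([0] : List Int)
    = (List.range (bs.length + 1)).map (fun t => pvS bs t) := by
  intro bs
  induction bs using List.reverseRecOn with
  | nil => simp [pvS, PySem.List.pyRange_one_eq_nil]
  | append_singleton ys y ih =>
    rw [List.foldl_append, ih, List.foldl_cons, List.foldl_nil]
    have hcongr : ∀ t : Nat, t ≤ ys.length → pvS ys t = pvS (ys ++ [y]) t := by
      intro t ht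
      simp only [pvS]
      congr 1
      apply List.countP_congr
      intro x hx
      rw [PySem.List.mem_pyRange_one] at hx
      rw [List.getD_append _ _ _ _ (by omega)]
    have hmapeq : (List.range (ys.length + 1)).map (fun t => pvS ys t)
        = (List.range (ys.length + 1)).map (fun t => pvS (ys ++ [y]) t) := by
      apply List.map_congr_left
      intro t ht
      rw [List.mem_range] at ht
      exact hcongr t (by omega)
    have hlast : PySem.List.pyGetD ((List.range (ys.length + 1)).map (fun t => pvS ys t)) (-1) 0
        = pvS ys ys.length := by
      rw [List.range_succ, List.map_append, List.map_singleton]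
      exact PySem.List.pyGetD_neg_one_append_singleton _ _ _
    have hstep : pvS ys ys.length + (if y then 1 else 0) = pvS (ys ++ [y]) (ys.length + 1) := by
      rw [hcongr ys.length (le_refl _)]
      simp only [pvS]
      rw [show ((ys.length + 1 : Nat) : Int) = (ys.length : Int) + 1 by push_cast; ring,
        PySem.List.pyRange_one_succ_right (by positivity), List.countP_append,
        List.countP_cons, List.countP_nil]
      have hy : (ys ++ [y]).getD ((ys.length : Int)).toNat false = y := by
        rw [Int.toNat_natCast, List.getD_eq_getElem?_getD, List.getElem?_append_right (le_refl _)]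
        simp
      rw [hy]
      cases y <;> push_cast <;> simp
    rw [hlast, hstep, hmapeq, List.length_append, List.length_singleton,
      List.range_succ (n := ys.length + 1), List.map_append, List.map_singleton]

lemma pvFoldMaxZero : ∀ (l : List Int), List.foldl (fun (me : Int) (_ : Int) => max me 0) (0 : Int) l = 0 := by
  intro l
  induction l with
  | nil => rfl
  | cons x t ih => simpa using ih

-- ===== VERDICT (by name: the statement is the Claim_ definition above) =====
theorem max_essence_posts_spec : Claim_equal_max_essence_posts := by
  intro n m k intervals _ hpre
  simp only [Spec_max_essence_posts, max_essence_posts, max_essence_posts_alt]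
  by_cases hk : k ≤ 0
  · rw [if_pos (Or.inl hk)]
    rw [PySem.List.foldl_congr_mem _ _ (fun (me : Int) (_ : Int) => max me 0) _ (by
      intro acc i _
      rw [PySem.List.pyRange_one_eq_nil (by omega), List.foldl_nil])]
    exact pvFoldMaxZero _
  · push_neg at hk
    by_cases hnk : n < k
    · rw [if_pos (Or.inr hnk)]
      rw [PySem.List.pyRange_one_eq_nil (by omega), List.foldl_nil]
    · push_neg at hnk
      rw [if_neg (by omega)]
      obtain ⟨hLs, hLb, hrel⟩ := pvRelMark intervals
        (List.replicate n.toNat "普通") (List.replicate n.toNat false)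
        (by simp)
        (by
          intro j
          have hs : (List.replicate n.toNat "普通").getD j "" ≠ "精华" := by
            rcases Nat.lt_or_ge j n.toNat with h | h
            · rw [List.getD_replicate _ h]; decide
            · rw [List.getD_eq_getElem?_getD, List.getElem?_eq_none (by simpa using h)]; decide
          have hb : (List.replicate n.toNat false).getD j false = false := by
            rcases Nat.lt_or_ge j n.toNat with h | h
            · exact List.getD_replicate _ h
            · rw [List.getD_eq_getElem?_getD, List.getElem?_eq_none (by simpa using h)]; rfl
          exact iff_of_false hs (fun h => by rw [hb] at h; exact Bool.false_ne_true h))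
      set bsF := intervals.foldl (fun bs iv =>
          (PySem.List.pyRange (iv.1 - 1) iv.2 1).foldl
            (fun a i => PySem.List.pySetD a i true) bs) (List.replicate n.toNat false)
        with hbsF
      have hlenb : bsF.length = n.toNat := by
        rw [hLb, List.length_replicate]
      rw [pvPrefBuild, hlenb]
      rw [PySem.List.foldl_congr_mem _ _
        (fun (me : Int) i => max me (((PySem.List.pyRange i (i + k)).countP
          (fun x => bsF.getD x.toNat false) : Nat) : Int)) _
        (by
          intro acc i hi
          rw [PySem.List.mem_pyRange_one] at hi
          congr 1
          rw [PySem.List.foldl_ite_add_one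
            (fun j => PySem.List.pyGetD (intervals.foldl (fun ps iv =>
              (PySem.List.pyRange (iv.1 - 1) iv.2 1).foldl
                (fun a i => PySem.List.pySetD a i "精华") ps)
              (List.replicate n.toNat "普通")) j "" = "精华"), zero_add]
          congr 1
          apply List.countP_congr
          intro x hx
          rw [PySem.List.mem_pyRange_one] at hx
          conv_lhs => rw [show x = ((x.toNat : Nat) : Int) by omega, PySem.List.pyGetD_natCast]
          simpa using hrel x.toNat)]
      rw [List.map_congr_left
        (g := fun i => (((PySem.List.pyRange i (i + k)).countP
          (fun x => bsF.getD x.toNat false) : Nat) : Int))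
        (by
          intro j hj
          rw [PySem.List.mem_pyRange_one] at hj
          have h1 : PySem.List.pyGetD ((List.range (n.toNat + 1)).map (fun t => pvS bsF t)) (j + k) 0
              = pvS bsF (j + k).toNat := by
            rw [show j + k = (((j + k).toNat : Nat) : Int) by omega]
            exact pvGetPref _ _ _ (by omega)
          have h2 : PySem.List.pyGetD ((List.range (n.toNat + 1)).map (fun t => pvS bsF t)) j 0
              = pvS bsF j.toNat := by
            rw [show j = ((j.toNat : Nat) : Int) by omega]
            exact pvGetPref _ _ _ (by omega)
          rw [h1, h2]
          simp only [pvS]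
          rw [show (((j + k).toNat : Nat) : Int) = j + k by omega,
            show ((j.toNat : Nat) : Int) = j by omega,
            PySem.List.pyRange_one_append 0 j (j + k) (by omega) (by omega),
            List.countP_append]
          push_cast
          ring)]
      rw [PySem.List.pyRange_one_cons (show (0 : Int) < n - k + 1 by omega), List.map_cons,
        PySem.List.max?_id_cons, Option.getD_some, List.foldl_cons,
        max_eq_right (Int.natCast_nonneg _), ← List.foldl_map]
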